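-- pv_equiv track=rewrite | github.com/TrellixVulnTeam/monorail_3DR3 | appengine/findit/libs/test_name_util.py | RemoveAllPrefixesFromGTestName
-- ===== SOURCE A (Python) =====
-- _GTEST_PREFIXES = ['PRE_', '*']
--
-- def RemoveAllPrefixesFromGTestName(test):
--   """Removes prefixes from test names.
--
--   Args:
--     test (str): A test's name, eg: 'suite1.PRE_test1'.
--
--   Returns:
--     base_test (str): A base test name, eg: 'suite1.test1'.
--   """
--   test_name_start = max(test.find('.'), 0)
--   if test_name_start == 0:
--     return test
--
--   test_suite = test[:test_name_start]
--   test_name = test[test_name_start + 1:]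
--
--   for prefix in _GTEST_PREFIXES:
--     while test_name.startswith(prefix):
--       test_name = test_name[len(prefix):]
--
--   base_test = '%s.%s' % (test_suite, test_name)
--   return base_test
-- ===== SOURCE B (Python) =====
-- def _strip_pre(name):
--   return _strip_pre(name[4:]) if name.startswith('PRE_') else name
--
--
-- def RemoveAllPrefixesFromGTestName(test):
--   """Removes prefixes from test names (partition + recursion + lstrip)."""
--   suite, dot, name = test.partition('.')
--   if dot and suite:
--     return suite + '.' + _strip_pre(name).lstrip('*')
--   return test
-- ===== Notes on version B (the rewrite author's own statement) =====
-- stated objective: idiomatic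
-- what changed: Splits with str.partition instead of find plus manual slicing, strips the PRE_ prefixes by recursion instead of a prefix-list while loop, and removes the leading asterisks with str.lstrip instead of a character-by-character while loop.
import Mathlib
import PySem

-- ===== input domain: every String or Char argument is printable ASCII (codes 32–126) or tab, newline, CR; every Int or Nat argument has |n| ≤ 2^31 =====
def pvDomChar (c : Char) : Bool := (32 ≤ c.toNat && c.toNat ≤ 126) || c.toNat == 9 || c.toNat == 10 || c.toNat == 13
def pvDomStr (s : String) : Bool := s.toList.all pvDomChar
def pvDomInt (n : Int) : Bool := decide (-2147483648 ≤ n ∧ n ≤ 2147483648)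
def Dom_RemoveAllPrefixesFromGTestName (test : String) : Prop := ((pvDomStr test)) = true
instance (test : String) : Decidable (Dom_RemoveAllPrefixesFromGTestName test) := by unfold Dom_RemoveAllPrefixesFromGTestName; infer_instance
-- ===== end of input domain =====

-- B restructures A: str.partition instead of find+slices, recursion instead of the
-- prefix-list while loop for 'PRE_', and lstrip('*') instead of the '*' while loop.

-- ===== PORT A =====

-- while test_name.startswith('PRE_'): test_name = test_name[4:]   (len('PRE_') = 4)
def pvStripPreA (name : List Char) : List Char :=
  if h : PySem.Chars.startswith name "PRE_".toList then
    pvStripPreA (PySem.Chars.slice name (some 4) none)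
  else name
termination_by name.length
decreasing_by
  simp only [PySem.Chars.slice_eq_listSlice]
  rw [PySem.List.slice_from name (show (0:Int) ≤ 4 by norm_num)]
  have hp : "PRE_".toList <+: name := (PySem.Chars.startswith_iff name _).mp h
  have : 4 ≤ name.length := by
    have := hp.length_le; simpa using this
  simp only [List.length_drop]; omega

-- while test_name.startswith('*'): test_name = test_name[1:]   (len('*') = 1)
def pvStripStarA (name : List Char) : List Char :=
  if h : PySem.Chars.startswith name "*".toList then
    pvStripStarA (PySem.Chars.slice name (some 1) none)
  else name
termination_by name.length
decreasing_by
  simp only [PySem.Chars.slice_eq_listSlice]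
  rw [PySem.List.slice_from name (show (0:Int) ≤ 1 by norm_num)]
  have hp : "*".toList <+: name := (PySem.Chars.startswith_iff name _).mp h
  have : 1 ≤ name.length := by
    have := hp.length_le; simpa using this
  simp only [List.length_drop]; omega

def RemoveAllPrefixesFromGTestName (test : String) : String :=
  let cs := test.toList
  let test_name_start : Int := max (PySem.Chars.find cs ".".toList) 0
  if test_name_start = 0 then test
  else
    let test_suite := PySem.Chars.slice cs none (some test_name_start)
    let test_name := PySem.Chars.slice cs (some (test_name_start + 1)) none
    -- for prefix in ['PRE_', '*']: while …  (the two iterations of the constant list)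
    let test_name := pvStripStarA (pvStripPreA test_name)
    -- '%s.%s' % (test_suite, test_name)
    String.ofList (test_suite ++ '.' :: test_name)

-- ===== PORT B =====

-- test.partition('.')  →  (before, found?, after), hand-ported (exact for the first '.')
def pvPartitionDot (cs : List Char) : List Char × Bool × List Char :=
  match cs with
  | [] => ([], false, [])
  | c :: rest =>
    if c = '.' then ([], true, rest)
    else
      let r := pvPartitionDot rest
      (c :: r.1, r.2.1, r.2.2)

-- _strip_pre: recursive strip of 'PRE_' (name[4:] is List.drop 4)
def pvStripPreB (name : List Char) : List Char :=
  if h : "PRE_".toList <+: name then pvStripPreB (name.drop 4) else name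
termination_by name.length
decreasing_by
  have : 4 ≤ name.length := by have := h.length_le; simpa using this
  simp only [List.length_drop]; omega

def RemoveAllPrefixesFromGTestName_alt (test : String) : String :=
  let r := pvPartitionDot test.toList
  if r.2.1 ∧ r.1 ≠ [] then
    -- suite + '.' + _strip_pre(name).lstrip('*')
    String.ofList (r.1 ++ '.' :: (pvStripPreB r.2.2).dropWhile (· == '*'))
  else test

-- ===== PRECONDITION & SPEC =====
def Spec_RemoveAllPrefixesFromGTestName (test : String) (out : String) : Prop := out = RemoveAllPrefixesFromGTestName_alt test
instance (test : String) (out : String) : Decidable (Spec_RemoveAllPrefixesFromGTestName test out) := by unfold Spec_RemoveAllPrefixesFromGTestName; infer_instance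

-- ===== CLAIM (what is proved, stated in full; the proofs are below) =====
def Claim_equal_RemoveAllPrefixesFromGTestName : Prop := ∀ (test : String), Dom_RemoveAllPrefixesFromGTestName test → Spec_RemoveAllPrefixesFromGTestName test (RemoveAllPrefixesFromGTestName test)

-- ===== LEMMAS AND PROOFS =====

-- partition characterisation
lemma pvPartitionDot_false (cs : List Char) (h : (pvPartitionDot cs).2.1 = false) :
    '.' ∉ cs := by
  induction cs with
  | nil => simp
  | cons c rest ih =>
    by_cases hc : c = '.'
    · simp [pvPartitionDot, hc] at h
    · simp [pvPartitionDot, hc] at h ⊢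
      exact ⟨fun he => hc he.symm, ih h⟩

lemma pvPartitionDot_true (cs : List Char) (h : (pvPartitionDot cs).2.1 = true) :
    cs = (pvPartitionDot cs).1 ++ '.' :: (pvPartitionDot cs).2.2 ∧ '.' ∉ (pvPartitionDot cs).1 := by
  induction cs with
  | nil => simp [pvPartitionDot] at h
  | cons c rest ih =>
    by_cases hc : c = '.'
    · simp [pvPartitionDot, hc]
    · simp only [pvPartitionDot, if_neg hc] at h ⊢
      obtain ⟨h1, h2⟩ := ih h
      refine ⟨by simpa using congrArg (c :: ·) h1, ?_⟩
      simp only [List.mem_cons, not_or]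
      exact ⟨fun he => hc he.symm, h2⟩

-- strip-loop equivalences
lemma stripPre_eq (name : List Char) : pvStripPreA name = pvStripPreB name := by
  induction name using pvStripPreB.induct with
  | case1 name h ih =>
    rw [pvStripPreA, pvStripPreB]
    have hs : PySem.Chars.startswith name "PRE_".toList = true :=
      (PySem.Chars.startswith_iff name _).mpr h
    rw [dif_pos hs, dif_pos h, ← ih]
    congr 1
    simp only [PySem.Chars.slice_eq_listSlice]
    rw [PySem.List.slice_from name (show (0:Int) ≤ 4 by norm_num)]
    rfl
  | case2 name h =>
    rw [pvStripPreA, pvStripPreB]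
    have hs : ¬ PySem.Chars.startswith name "PRE_".toList = true := by
      rw [PySem.Chars.startswith_iff]; exact h
    rw [dif_neg hs, dif_neg h]

lemma stripStar_eq (name : List Char) : pvStripStarA name = name.dropWhile (· == '*') := by
  induction name using pvStripStarA.induct with
  | case1 name h ih =>
    rw [pvStripStarA, dif_pos h]
    have hp : "*".toList <+: name := (PySem.Chars.startswith_iff name _).mp h
    obtain ⟨t, ht⟩ := hp
    have hn : name = '*' :: t := by simpa using ht.symm
    have hslice : PySem.Chars.slice name (some 1) none = t := by
      simp only [PySem.Chars.slice_eq_listSlice]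
      rw [PySem.List.slice_from name (show (0:Int) ≤ 1 by norm_num)]
      simp [hn]
    rw [hslice] at ih ⊢
    rw [ih, hn]
    simp [List.dropWhile]
  | case2 name h =>
    rw [pvStripStarA, dif_neg h]
    cases name with
    | nil => simp [List.dropWhile]
    | cons c t =>
      have hc : ¬ c = '*' := by
        intro hc
        apply h
        rw [PySem.Chars.startswith_iff]
        exact ⟨t, by simp [hc]⟩
      simp [List.dropWhile, beq_false_of_ne hc]

lemma pvPartitionDot_append (a b : List Char) (ha : '.' ∉ a) :
    pvPartitionDot (a ++ '.' :: b) = (a, true, b) := by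
  induction a with
  | nil => simp [pvPartitionDot]
  | cons c t ih =>
    simp only [List.mem_cons, not_or] at ha
    have hc : ¬ c = '.' := fun he => ha.1 he.symm
    simp [pvPartitionDot, hc, ih ha.2]

-- find on cs = a ++ '.' :: b with '.' ∉ a equals a.length
lemma find_dot_eq (a b : List Char) (ha : '.' ∉ a) :
    PySem.Chars.find (a ++ '.' :: b) ".".toList = (a.length : Int) := by
  set cs := a ++ '.' :: b with hcs
  have hinf : ".".toList <:+: cs := by
    refine ⟨a, b, by simp [hcs]⟩
  have hnn : 0 ≤ PySem.Chars.find cs ".".toList :=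
    (PySem.Chars.find_nonneg_iff cs ".".toList).mpr hinf
  obtain ⟨hpre, hmin⟩ := PySem.Chars.find_spec hnn
  set t := (PySem.Chars.find cs ".".toList).toNat with htdef
  -- prefix at a.length holds
  have hat : ".".toList <+: cs.drop a.length := by
    have : cs.drop a.length = '.' :: b := by simp [hcs]
    rw [this]; exact ⟨b, by simp⟩
  -- for i < a.length no prefix
  have hno : ∀ i, i < a.length → ¬ ".".toList <+: cs.drop i := by
    intro i hi hpref
    obtain ⟨u, hu⟩ := hpref
    have hget : cs.drop i = '.' :: u := by simpa using hu.symm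
    have hhead : cs[i]? = some '.' := by
      rw [← List.head?_drop, hget]; rfl
    have hai : a[i]? = some '.' := by
      rw [hcs, List.getElem?_append_left hi] at hhead
      exact hhead
    exact ha (List.mem_of_getElem? hai)
  have ht : t = a.length := by
    by_contra hne
    rcases Nat.lt_or_ge t a.length with hlt | hge
    · exact hno t hlt hpre
    · have : a.length < t := lt_of_le_of_ne hge (Ne.symm hne)
      exact hmin a.length this hat
  have : (PySem.Chars.find cs ".".toList) = (t : Int) := by
    omega
  rw [this, ht]

lemma find_dot_neg (cs : List Char) (h : '.' ∉ cs) :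
    PySem.Chars.find cs ".".toList = -1 := by
  rw [PySem.Chars.find_eq_neg_one_iff]
  intro ⟨u, v, huv⟩
  apply h
  rw [← huv]
  simp

-- ===== VERDICT (by name: the statement is the Claim_ definition above) =====
theorem RemoveAllPrefixesFromGTestName_spec : Claim_equal_RemoveAllPrefixesFromGTestName := by
  intro test _
  unfold Spec_RemoveAllPrefixesFromGTestName
  unfold RemoveAllPrefixesFromGTestName RemoveAllPrefixesFromGTestName_alt
  cases hp : (pvPartitionDot test.toList).2.1 with
  | false =>
    have hnd := pvPartitionDot_false test.toList hp
    have hf := find_dot_neg test.toList hnd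
    simp only [hf, hp]
    norm_num
  | true =>
    obtain ⟨heq, hna⟩ := pvPartitionDot_true test.toList hp
    cases ha : (pvPartitionDot test.toList).1 with
    | nil =>
      rw [ha] at heq hna
      have hf : PySem.Chars.find test.toList ".".toList = 0 := by
        rw [heq]
        simpa using find_dot_eq [] (pvPartitionDot test.toList).2.2 (by simp)
      simp only [hf, hp, ha]
      norm_num
    | cons c t =>
      rw [ha] at heq hna
      have hf : PySem.Chars.find test.toList ".".toList = ((c :: t).length : Int) := by
        rw [heq]
        exact find_dot_eq (c :: t) (pvPartitionDot test.toList).2.2 hna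
      have hmax : max (PySem.Chars.find test.toList ".".toList) 0 = ((c :: t).length : Int) := by
        rw [hf]; exact max_eq_left (Int.natCast_nonneg _)
      have hne0 : ¬ ((c :: t).length : Int) = 0 := by
        intro hx
        rw [Int.natCast_eq_zero] at hx
        simp at hx
      have hsuite : PySem.Chars.slice test.toList none (some ((c :: t).length : Int)) = c :: t := by
        simp only [PySem.Chars.slice_eq_listSlice]
        rw [PySem.List.slice_to test.toList (Int.natCast_nonneg (c :: t).length)]
        rw [heq]
        simp
      have hname : PySem.Chars.slice test.toList (some (((c :: t).length : Int) + 1)) none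
          = (pvPartitionDot test.toList).2.2 := by
        simp only [PySem.Chars.slice_eq_listSlice]
        have h1 : (((c :: t).length : Int) + 1) = (((c :: t).length + 1 : Nat) : Int) := by
          push_cast; ring
        rw [h1, PySem.List.slice_from test.toList (Int.natCast_nonneg ((c :: t).length + 1))]
        rw [heq]
        have h2 : c :: t ++ '.' :: (pvPartitionDot test.toList).2.2
            = (c :: t ++ ['.']) ++ (pvPartitionDot test.toList).2.2 := by simp
        have h3 : ((((c :: t).length + 1 : Nat) : Int)).toNat = (c :: t ++ ['.']).length := by
          simp; omega
        rw [h3, h2, List.drop_left, ← h2, pvPartitionDot_append (c :: t) _ hna]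
      simp only [hmax, if_neg hne0, hsuite, hname, hp, ha]
      rw [stripPre_eq, stripStar_eq]
      simp
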